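-- pv_equiv track=rewrite | github.com/DrMikeG/AdventOfCode2020 | 04b/tool_src/main.py | isValidSnake
-- ===== SOURCE A (Python) =====
-- def isValidSnake(walk,step):
--     # not valid if step is already in snake
--     if ( step in walk ):
--         return False # do not re-walk path
--
--     notValid = [(1,3),(2,8),(3,1),(5,5),(5,6),(6,1),(6,2),(6,7),(8,0),(8,1),(8,3)]
--
--     if ( step in notValid ):
--         return False # do not re-walk path
--     # not valid if with
--
--     # ignoring the last 2 steps, you may not be adjacent to a position.
--     if (len(walk) > 2):
--         shorterWalk = walk[:-2]
--         # generate the 8 postions 1 step away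
--         for rd in [-1,0,1]:
--             for cd in [-1,0,1]:
--                 t = (step[0]+rd,step[1]+cd)
--                 if (t in shorterWalk):
--                     return False
--
--     return True
-- ===== SOURCE B (Python) =====
-- BAD = {(1,3),(2,8),(3,1),(5,5),(5,6),(6,1),(6,2),(6,7),(8,0),(8,1),(8,3)}
--
-- def isValidSnake(walk, step):
--     if step in BAD:
--         return False
--     limit = len(walk) - 2
--     for i, p in enumerate(walk):
--         if p == step:
--             return False
--         if i < limit and max(abs(p[0] - step[0]), abs(p[1] - step[1])) <= 1:
--             return False
--     return True
-- ===== Notes on version B (the rewrite author's own statement) =====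
-- stated objective: simpler
-- what changed: B makes a single indexed pass over walk, rejecting a point that equals step or that lies within Chebyshev distance 1 while its index is below len(walk)-2, instead of A's separate membership test plus enumeration of the 9 neighbour offsets each tested against the slice walk[:-2].
import Mathlib
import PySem

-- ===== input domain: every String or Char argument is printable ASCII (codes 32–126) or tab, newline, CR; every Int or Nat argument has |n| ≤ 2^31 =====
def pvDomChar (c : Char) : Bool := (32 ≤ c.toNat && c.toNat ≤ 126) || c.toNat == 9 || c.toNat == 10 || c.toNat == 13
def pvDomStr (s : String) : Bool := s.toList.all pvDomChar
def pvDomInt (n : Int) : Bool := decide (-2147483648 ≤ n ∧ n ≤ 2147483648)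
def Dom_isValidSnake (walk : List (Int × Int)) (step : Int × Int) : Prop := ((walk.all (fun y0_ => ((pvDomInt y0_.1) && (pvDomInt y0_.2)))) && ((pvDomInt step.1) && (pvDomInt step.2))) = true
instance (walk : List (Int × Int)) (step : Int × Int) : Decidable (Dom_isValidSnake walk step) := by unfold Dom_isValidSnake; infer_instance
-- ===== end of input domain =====

-- B replaces A's membership test plus 9-neighbour-offset enumeration over walk[:-2]
-- by one indexed recursive pass over walk with a Chebyshev-distance test (objective: simpler).

-- ===== PORT A =====
-- the notValid literal list from A
def pvNotValid : List (Int × Int) :=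
  [(1,3),(2,8),(3,1),(5,5),(5,6),(6,1),(6,2),(6,7),(8,0),(8,1),(8,3)]

def isValidSnake (walk : List (Int × Int)) (step : Int × Int) : Bool :=
  if walk.contains step then false
  else if pvNotValid.contains step then false
  else if walk.length > 2 then
    let shorterWalk := PySem.List.slice walk none (some (-2))   -- walk[:-2]
    -- the nested 'for rd … for cd … if t in shorterWalk: return False' loops, as an any over the offsets
    if (([-1,0,1] : List Int).any fun rd => ([-1,0,1] : List Int).any fun cd =>
         shorterWalk.contains (step.1 + rd, step.2 + cd)) then false
    else true
  else true

-- ===== PORT B =====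
-- the BAD set literal from Source B (a Python set of pairs)
def pvBadSet : PySem.Set (Int × Int) :=
  PySem.Set.ofList [(1,3),(2,8),(3,1),(5,5),(5,6),(6,1),(6,2),(6,7),(8,0),(8,1),(8,3)]

-- max(abs(p[0]-step[0]), abs(p[1]-step[1])) <= 1
def pvClose (step p : Int × Int) : Bool :=
  decide (max (p.1 - step.1).natAbs (p.2 - step.2).natAbs ≤ 1)

-- the 'for i, p in enumerate(walk)' loop with its two early returns
def pvSnakeScan (step : Int × Int) (limit : Int) : List (Int × Int) → Int → Bool
  | [], _ => true
  | p :: rest, i =>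
    if p = step then false
    else if i < limit ∧ pvClose step p = true then false
    else pvSnakeScan step limit rest (i + 1)

def isValidSnake_alt (walk : List (Int × Int)) (step : Int × Int) : Bool :=
  if pvBadSet.contains step then false
  else pvSnakeScan step ((walk.length : Int) - 2) walk 0

-- ===== PRECONDITION & SPEC =====
def Spec_isValidSnake (walk : List (Int × Int)) (step : Int × Int) (out : Bool) : Prop := out = isValidSnake_alt walk step
instance (walk : List (Int × Int)) (step : Int × Int) (out : Bool) : Decidable (Spec_isValidSnake walk step out) := by unfold Spec_isValidSnake; infer_instance

-- ===== CLAIM (what is proved, stated in full; the proofs are below) =====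
def Claim_equal_isValidSnake : Prop := ∀ (walk : List (Int × Int)) (step : Int × Int), Dom_isValidSnake walk step → Spec_isValidSnake walk step (isValidSnake walk step)

-- ===== LEMMAS AND PROOFS =====

-- the indexed scan, characterised: no element equals step, and no element whose index is below limit is Chebyshev-close
lemma pvSnakeScan_eq (step : Int × Int) (limit : Int) (l : List (Int × Int)) (i : Int) :
    pvSnakeScan step limit l i =
      (!(l.contains step) && !((l.take (limit - i).toNat).any (pvClose step))) := by
  induction l generalizing i with
  | nil => simp [pvSnakeScan]
  | cons p rest ih =>
    by_cases hp : p = step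
    · subst hp; simp [pvSnakeScan]
    · have hp' : ¬ step = p := fun h => hp h.symm
      rw [pvSnakeScan, if_neg hp]
      by_cases hlim : i < limit
      · have htake : (limit - i).toNat = (limit - (i+1)).toNat + 1 := by omega
        by_cases hc : pvClose step p = true
        · rw [if_pos ⟨hlim, hc⟩, htake]
          simp [hc]
        · rw [if_neg (by tauto), ih, htake]
          simp [hp', Bool.eq_false_iff.mpr hc]
      · have htake0 : (limit - i).toNat = 0 := by omega
        have htake1 : (limit - (i+1)).toNat = 0 := by omega
        rw [if_neg (by tauto), ih]
        simp [htake0, htake1, hp']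

-- A's 9-offset membership search equals the Chebyshev-distance scan over the same list
lemma offsets_eq_cheby (l : List (Int × Int)) (st : Int × Int) :
    (([-1,0,1] : List Int).any fun rd => ([-1,0,1] : List Int).any fun cd =>
       l.contains (st.1 + rd, st.2 + cd))
    = l.any (pvClose st) := by
  apply Bool.eq_iff_iff.mpr
  simp only [pvClose, List.any_eq_true, List.contains_iff_mem, List.mem_cons, List.not_mem_nil,
    decide_eq_true_eq]
  constructor
  · rintro ⟨rd, hrd, cd, hcd, hmem⟩
    exact ⟨(st.1 + rd, st.2 + cd), hmem, by simp at hrd hcd ⊢; omega⟩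
  · rintro ⟨⟨x, y⟩, hmem, hd⟩
    refine ⟨x - st.1, ?_, y - st.2, ?_, by simpa using hmem⟩ <;> simp at hd ⊢ <;> omega

-- membership in the Python BAD set is membership in A's notValid list (no duplicates, so ofList keeps it as is)
lemma bad_contains_eq (st : Int × Int) : pvBadSet.contains st = pvNotValid.contains st := by
  have h : pvBadSet = pvNotValid := by decide
  rw [h]
  rfl

-- ===== VERDICT (by name: the statement is the Claim_ definition above) =====
theorem isValidSnake_spec : Claim_equal_isValidSnake := by
  intro walk step _
  unfold Spec_isValidSnake
  simp only [isValidSnake, isValidSnake_alt]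
  rw [pvSnakeScan_eq, bad_contains_eq, offsets_eq_cheby]
  by_cases hbad : pvNotValid.contains step = true
  · by_cases hw : walk.contains step = true
    · rw [if_pos hw, if_pos hbad]
    · rw [if_neg hw, if_pos hbad, if_pos hbad]
  · rw [if_neg hbad, if_neg hbad]
    by_cases hw : walk.contains step = true
    · rw [if_pos hw, hw]
      rfl
    · rw [if_neg hw]
      rw [Bool.not_eq_true] at hw
      rw [hw]
      by_cases hlen : walk.length > 2
      · have hslice : PySem.List.slice walk none (some (-2)) = walk.take (walk.length - 2) := by
          rw [PySem.List.slice_to_neg_ofNat walk 2 (by omega)]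
        have htn : ((walk.length : Int) - 2 - 0).toNat = walk.length - 2 := by omega
        rw [if_pos hlen, hslice, htn]
        cases (walk.take (walk.length - 2)).any (pvClose step) <;> decide
      · have htn : ((walk.length : Int) - 2 - 0).toNat = 0 := by omega
        rw [if_neg hlen, htn]
        simp
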